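-- pv_equiv track=rewrite | github.com/abdalhamidgamer00-create/distribution_of_goods | src/app/gui/services/file/grouper.py | group_files_by_source_target
-- ===== SOURCE A (Python) =====
-- from typing import List, Dict, Tuple, Any
--
-- def group_files_by_source_target(
--     files: List[Dict[str, Any]]
-- ) -> Dict[Tuple[str, str], List[Dict]]:
--     """Group files by source and target branches."""
--     files_grouped = {}
--
--     for file_info in files:
--         source = file_info.get('source_branch', 'unknown')
--         target = file_info.get('target_branch', 'unknown')
--         key = (source, target)
--
--         if key not in files_grouped:
--             files_grouped[key] = []
--
--         files_grouped[key].append(file_info)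
--
--     return files_grouped
-- ===== SOURCE B (Python) =====
-- def group_files_by_source_target(files):
--     """Group files by source and target branches.
--
--     Alternative decomposition: collect the distinct (source, target) keys in
--     first-seen order, then build each group with one filtering pass per key.
--     """
--     def key(f):
--         return (f.get('source_branch', 'unknown'), f.get('target_branch', 'unknown'))
--
--     keys = []
--     for f in files:
--         k = key(f)
--         if k not in keys:
--             keys.append(k)
--
--     return {k: [f for f in files if key(f) == k] for k in keys}
-- ===== Notes on version B (the rewrite author's own statement) =====
-- stated objective: alternative
-- what changed: A accumulates groups in a dict in one pass; B first deduplicates the (source,target) keys in first-seen order and then builds each group by a separate filtering pass over the input.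
import Mathlib
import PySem

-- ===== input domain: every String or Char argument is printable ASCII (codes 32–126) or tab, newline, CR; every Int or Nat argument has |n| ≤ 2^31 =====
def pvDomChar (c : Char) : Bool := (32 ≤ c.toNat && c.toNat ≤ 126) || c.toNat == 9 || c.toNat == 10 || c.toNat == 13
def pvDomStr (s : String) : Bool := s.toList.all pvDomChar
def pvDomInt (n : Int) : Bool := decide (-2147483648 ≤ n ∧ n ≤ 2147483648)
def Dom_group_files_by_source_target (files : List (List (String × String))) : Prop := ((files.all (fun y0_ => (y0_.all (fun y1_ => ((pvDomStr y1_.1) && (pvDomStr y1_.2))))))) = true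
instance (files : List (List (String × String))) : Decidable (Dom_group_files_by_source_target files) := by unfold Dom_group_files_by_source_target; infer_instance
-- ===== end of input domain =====

-- B groups by first collecting the distinct (source,target) keys and then one filtering pass per key,
-- instead of A's single-pass dict accumulation; objective: alternative decomposition, same return value.

-- ===== PORT A =====
def group_files_by_source_target (files : List (List (String × String))) : List (String × String × List (List (String × String))) :=
  let files_grouped : PySem.Dict (String × String) (List (List (String × String))) :=
    files.foldl (fun files_grouped file_info =>
      let source := (PySem.Dict.mk file_info).getD "source_branch" "unknown"
      let target := (PySem.Dict.mk file_info).getD "target_branch" "unknown"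
      let key := (source, target)
      let files_grouped :=
        if files_grouped.contains key then files_grouped
        else files_grouped.insert key []
      files_grouped.modify key [] (fun g => g ++ [file_info]))
    PySem.Dict.empty
  files_grouped.items.map (fun p => (p.1.1, p.1.2, p.2))

-- ===== PORT B =====
-- B's local helper `key(f)`
def pvKeyB (f : List (String × String)) : String × String :=
  ((PySem.Dict.mk f).getD "source_branch" "unknown", (PySem.Dict.mk f).getD "target_branch" "unknown")

def group_files_by_source_target_alt (files : List (List (String × String))) : List (String × String × List (List (String × String))) :=
  let keys := files.foldl (fun ks f => if pvKeyB f ∈ ks then ks else ks ++ [pvKeyB f]) []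
  keys.map (fun k => (k.1, k.2, files.filter (fun f => pvKeyB f == k)))

-- ===== PRECONDITION & SPEC =====
def Spec_group_files_by_source_target (files : List (List (String × String))) (out : List (String × String × List (List (String × String)))) : Prop := out = group_files_by_source_target_alt files
instance (files : List (List (String × String))) (out : List (String × String × List (List (String × String)))) : Decidable (Spec_group_files_by_source_target files out) := by unfold Spec_group_files_by_source_target; infer_instance

-- ===== CLAIM (what is proved, stated in full; the proofs are below) =====
def Claim_equal_group_files_by_source_target : Prop := ∀ (files : List (List (String × String))), Dom_group_files_by_source_target files → Spec_group_files_by_source_target files (group_files_by_source_target files)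

-- ===== LEMMAS AND PROOFS =====

-- A's loop body, named for the proofs
def pvStepA (d : PySem.Dict (String × String) (List (List (String × String)))) (f : List (String × String)) : PySem.Dict (String × String) (List (List (String × String))) :=
  let d' := if d.contains (pvKeyB f) then d else d.insert (pvKeyB f) []
  d'.modify (pvKeyB f) [] (fun g => g ++ [f])

lemma stepA_eq (files : List (List (String × String))) :
    group_files_by_source_target files
      = (files.foldl pvStepA PySem.Dict.empty).items.map (fun p => (p.1.1, p.1.2, p.2)) := rfl

lemma keys_stepA (d : PySem.Dict (String × String) (List (List (String × String)))) (f : List (String × String)) :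
    (pvStepA d f).keys = PySem.Set.add d.keys (pvKeyB f) := by
  unfold pvStepA
  by_cases h : d.contains (pvKeyB f)
  · simp only [h, if_true, PySem.Dict.keys_modify]
    rw [PySem.Dict.keys_insert_of_contains _ _ h]
    simp [PySem.Set.add, (PySem.Dict.contains_iff_mem_keys d _).mp h]
  · have h' : d.contains (pvKeyB f) = false := by simpa using h
    simp only [h', Bool.false_eq_true, if_false, PySem.Dict.keys_modify]
    rw [PySem.Dict.keys_insert_of_contains _ _ (PySem.Dict.contains_insert_self _ _ _),
        PySem.Dict.keys_insert_of_not_contains _ _ h']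
    have hm : ¬ pvKeyB f ∈ d.keys := fun hm => by
      simp [(PySem.Dict.contains_iff_mem_keys d _).mpr hm] at h'
    simp [PySem.Set.add, hm]

lemma getD_stepA (d : PySem.Dict (String × String) (List (List (String × String)))) (f : List (String × String)) (k : String × String) :
    (pvStepA d f).getD k [] = if k = pvKeyB f then d.getD k [] ++ [f] else d.getD k [] := by
  unfold pvStepA
  by_cases h : d.contains (pvKeyB f)
  · simp only [h, if_true, PySem.Dict.getD_modify]
    split_ifs with hk
    · subst hk; rfl
    · rfl
  · have h' : d.contains (pvKeyB f) = false := by simpa using h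
    simp only [h', Bool.false_eq_true, if_false, PySem.Dict.getD_modify, PySem.Dict.getD_insert]
    split_ifs with hk
    · subst hk; simpa using PySem.Dict.getD_of_not_contains d [] h'
    · rfl

lemma nodup_add_set (s : PySem.Set (String × String)) (x : String × String) (h : s.Nodup) :
    (PySem.Set.add s x).Nodup := by
  by_cases hm : x ∈ s
  · simpa [PySem.Set.add, hm] using h
  · simp only [PySem.Set.add]
    have hc : s.contains x = false := by simpa using hm
    rw [hc]
    simp only [Bool.false_eq_true, if_false]
    exact List.Nodup.append h (List.nodup_singleton x) (by simpa using hm)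

lemma keys_foldl_stepA (files : List (List (String × String))) (d : PySem.Dict (String × String) (List (List (String × String)))) :
    (files.foldl pvStepA d).keys = files.foldl (fun ks f => PySem.Set.add ks (pvKeyB f)) d.keys := by
  induction files generalizing d with
  | nil => rfl
  | cons f t ih => simp [List.foldl_cons, ih, keys_stepA]

lemma getD_foldl_stepA (files : List (List (String × String))) (d : PySem.Dict (String × String) (List (List (String × String)))) (k : String × String) :
    (files.foldl pvStepA d).getD k [] = d.getD k [] ++ files.filter (fun f => pvKeyB f == k) := by
  induction files generalizing d with
  | nil => simp
  | cons f t ih =>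
      simp only [List.foldl_cons, ih, getD_stepA, List.filter_cons]
      by_cases h : pvKeyB f = k
      · simp [h]
      · have h2 : ¬ k = pvKeyB f := fun hk => h hk.symm
        simp [h, h2]

lemma nodup_keys_foldl_stepA (files : List (List (String × String))) (d : PySem.Dict (String × String) (List (List (String × String)))) (h : d.keys.Nodup) :
    (files.foldl pvStepA d).keys.Nodup := by
  induction files generalizing d with
  | nil => exact h
  | cons f t ih =>
      rw [List.foldl_cons]
      exact ih _ (by rw [keys_stepA]; exact nodup_add_set _ _ h)

lemma keysB_eq (files : List (List (String × String))) (ks : List (String × String)) :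
    files.foldl (fun ks f => if pvKeyB f ∈ ks then ks else ks ++ [pvKeyB f]) ks
      = files.foldl (fun ks f => PySem.Set.add ks (pvKeyB f)) ks := by
  have h : (fun (ks : List (String × String)) f => if pvKeyB f ∈ ks then ks else ks ++ [pvKeyB f])
      = (fun ks f => PySem.Set.add ks (pvKeyB f)) := by
    funext ks f
    simp [PySem.Set.add]
  rw [h]

-- ===== VERDICT (by name: the statement is the Claim_ definition above) =====
theorem group_files_by_source_target_spec : Claim_equal_group_files_by_source_target := by
  intro files _
  unfold Spec_group_files_by_source_target group_files_by_source_target_alt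
  rw [stepA_eq, keysB_eq]
  have hnd : (files.foldl pvStepA PySem.Dict.empty).keys.Nodup :=
    nodup_keys_foldl_stepA files _ (by simp)
  rw [PySem.Dict.items_eq_map_keys _ hnd []]
  rw [keys_foldl_stepA, List.map_map]
  refine List.map_congr_left ?_
  intro k _
  simp only [Function.comp]
  rw [getD_foldl_stepA]
  simp [PySem.Dict.getD_empty]
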